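-- pv_equiv track=rewrite | github.com/kenz-gelsoft/wxRust2 | gen_binding.py | generated_rs
-- ===== SOURCE A (Python) =====
-- def generated_rs(initials, libname):
--     yield '''\
-- #![allow(non_upper_case_globals)]
-- #![allow(unused_imports)]
--
-- use std::os::raw::{c_double, c_int, c_long, c_uchar, c_uint, c_void};
--
-- use super::*;
-- use methods::*;
-- '''
--     if libname == 'base':
--         yield '''\
-- pub use events::*;
-- mod events;
-- '''
--     yield 'mod ffi;'
--     for i in initials:
--         yield 'mod ffi_%s;' % (i,)
--     yield ''
--     yield 'pub mod methods;'
--     for i in initials: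
--         yield 'mod methods_%s;' % (i,)
--     yield ''
--     yield 'pub mod class;'
--     for i in initials:
--         yield 'mod class_%s;' % (i,)
-- ===== SOURCE B (Python) =====
-- _HEADER = '''\
-- #![allow(non_upper_case_globals)]
-- #![allow(unused_imports)]
--
-- use std::os::raw::{c_double, c_int, c_long, c_uchar, c_uint, c_void};
--
-- use super::*;
-- use methods::*;
-- '''
--
-- _EVENTS = '''\
-- pub use events::*;
-- mod events;
-- '''
--
--
-- def generated_rs(initials, libname):
--     # Build the body BACK-TO-FRONT: start from the last section and keep
--     # prepending each earlier section (with a blank-line separator before the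
--     # part already built) onto the accumulator.
--     tail = []
--     for leader, prefix in (('pub mod class;', 'class'),
--                            ('pub mod methods;', 'methods'),
--                            ('mod ffi;', 'ffi')):
--         block = [leader] + ['mod %s_%s;' % (prefix, i) for i in initials]
--         tail = block + ([''] + tail if tail else [])
--     yield _HEADER
--     if libname == 'base':
--         yield _EVENTS
--     yield from tail
-- ===== Notes on version B (the rewrite author's own statement) =====
-- stated objective: alternative
-- what changed: A emits the three section blocks front-to-back as straight-line yields; B builds the body back-to-front with an accumulator, prepending each earlier section (and the blank-line separator before the already-built tail) onto the part built so far, so the separator logic ('blank line only between sections') falls out of the nonemptiness of the accumulator instead of being hand-placed.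
import Mathlib
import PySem

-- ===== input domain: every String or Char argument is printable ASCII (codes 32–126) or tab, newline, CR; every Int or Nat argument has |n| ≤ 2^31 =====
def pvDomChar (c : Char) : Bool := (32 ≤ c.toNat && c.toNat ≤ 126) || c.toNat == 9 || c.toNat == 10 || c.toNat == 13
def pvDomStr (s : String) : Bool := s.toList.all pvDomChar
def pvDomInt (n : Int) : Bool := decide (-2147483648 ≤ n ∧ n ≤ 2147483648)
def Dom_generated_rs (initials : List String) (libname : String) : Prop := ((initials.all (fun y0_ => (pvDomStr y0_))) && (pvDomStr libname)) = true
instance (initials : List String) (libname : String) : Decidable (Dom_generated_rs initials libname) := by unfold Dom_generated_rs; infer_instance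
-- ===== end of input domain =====

-- B builds the body back-to-front with an accumulator, prepending each earlier
-- section (plus the separator before the already-built tail) instead of A's
-- front-to-back straight-line yields (objective: alternative).

def pvHeader : String := "#![allow(non_upper_case_globals)]\n#![allow(unused_imports)]\n\nuse std::os::raw::{c_double, c_int, c_long, c_uchar, c_uint, c_void};\n\nuse super::*;\nuse methods::*;\n"

def pvEvents : String := "pub use events::*;\nmod events;\n"

-- ===== PORT A =====
-- A yields the header, optionally the events block, then three hand-written
-- blocks front-to-back: leader line, one 'mod <prefix>_<i>;' per initial,
-- with a blank line written between blocks.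
def generated_rs (initials : List String) (libname : String) : List String :=
  [pvHeader]
  ++ (if libname == "base" then [pvEvents] else [])
  ++ ["mod ffi;"]
  ++ initials.map (fun i => "mod ffi_" ++ i ++ ";")
  ++ [""]
  ++ ["pub mod methods;"]
  ++ initials.map (fun i => "mod methods_" ++ i ++ ";")
  ++ [""]
  ++ ["pub mod class;"]
  ++ initials.map (fun i => "mod class_" ++ i ++ ";")

-- ===== PORT B =====
def generated_rs_alt (initials : List String) (libname : String) : List String :=
  let tail :=
    ([("pub mod class;", "class"), ("pub mod methods;", "methods"), ("mod ffi;", "ffi")] :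
        List (String × String)).foldl
      (fun tail lp =>
        ([lp.1] ++ initials.map (fun i => "mod " ++ lp.2 ++ "_" ++ i ++ ";"))
          ++ (if tail ≠ [] then [""] ++ tail else []))
      []
  [pvHeader]
  ++ (if libname == "base" then [pvEvents] else [])
  ++ tail

-- ===== PRECONDITION & SPEC =====
def Spec_generated_rs (initials : List String) (libname : String) (out : List String) : Prop := out = generated_rs_alt initials libname
instance (initials : List String) (libname : String) (out : List String) : Decidable (Spec_generated_rs initials libname out) := by unfold Spec_generated_rs; infer_instance

-- ===== CLAIM (what is proved, stated in full; the proofs are below) =====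
def Claim_equal_generated_rs : Prop := ∀ (initials : List String) (libname : String), Dom_generated_rs initials libname → Spec_generated_rs initials libname (generated_rs initials libname)

-- ===== LEMMAS AND PROOFS =====

-- ===== VERDICT (by name: the statement is the Claim_ definition above) =====
theorem generated_rs_spec : Claim_equal_generated_rs := by
  intro initials libname _
  unfold Spec_generated_rs generated_rs generated_rs_alt
  simp [List.foldl, List.append_assoc]
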